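-- pv_equiv track=rewrite | github.com/mr-drako/proyectitos-VScode | proyectos_sueltos/codigo_cata.py | sincronizar
-- ===== SOURCE A (Python) =====
-- def sincronizar(sinfonia):
--
--     #revisamos cada sinfonia
--     sincronizado = [sinfonia[0]]
--
--     for i in range(1,len(sinfonia)):
--
--         #creacion de lista silencios
--         #aqui ocupe lista por compresion, tu no puedes ocuparlo
--         #de ahi te enseño su version en for
--         silencio = ["--" for i in sinfonia[0]]
--
--
--
--
--         #inicio nos indica en que parte de la melodia vamos
--
--         #evita que edites partes de la melodia que ya arreglaste
--
--         inicio = 0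
--
--
--         #vemos 1 a 1 las notas del instrumento
--
--         for j in range(len(sinfonia[i])):
--
--
--             #cambiar hace que cada nota en el instrumento solo
--
--             #se coloque una ves
--
--             cambiar = True
--
--
--             #recorremos el silencio
--
--             for k in range(inicio, len(silencio)):
--
--
--                 #revisamos si la nota es igual a la melodia
--
--                 # y revisamos si podemos cambiarla
--
--                 if sinfonia[0][k] == sinfonia[i][j] and cambiar:
--
--
--
--                     #volvemos falso cambiar para que
--
--                     #solo editemos 1 vez por nota la melodia
--
--                     cambiar = False
--
--
--                     #cambiamos el silencio por la nota correspondiente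
--
--                     silencio[k] = sinfonia[i][j]
--
--
--
--                     #cambiamos inicio como la posicion siguiente
--
--                     #a la que acabamos de revisar, asi evitamos casos
--
--                     #de dobles
--
--                     inicio = k + 1
--
--
--
--         #como silencio es una lista no podemos agregarla
--
--         #y despues seguir editandola (python cosas)
--
--         #ocupamos .copy() para hacer una lista
--
--         #si no quieres usar .copy() por que te da miedito
--
--         #puedo enseñarte a copiar una lista sin metodos
--
--         sincronizado.append(silencio.copy())
--
--     return sincronizado
-- ===== SOURCE B (Python) =====
-- def sincronizar(sinfonia):
--     # Index every melody note's positions once, then for each instrument walk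
--     # each note's position list with a persistent pointer instead of rescanning
--     # the melody from the cursor for every note.
--     melodia = sinfonia[0]
--     posiciones = {}
--     for k in range(len(melodia)):
--         posiciones.setdefault(melodia[k], []).append(k)
--     resultado = [melodia]
--     for i in range(1, len(sinfonia)):
--         punteros = {}
--         fila = ["--"] * len(melodia)
--         inicio = 0
--         for nota in sinfonia[i]:
--             ps = posiciones.get(nota, [])
--             p = punteros.get(nota, 0)
--             while p < len(ps) and ps[p] < inicio:
--                 p += 1
--             if p < len(ps):
--                 k = ps[p]
--                 fila[k] = nota
--                 inicio = k + 1
--                 p += 1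
--             punteros[nota] = p
--         resultado.append(fila)
--     return resultado
-- ===== Notes on version B (the rewrite author's own statement) =====
-- stated objective: faster
-- what changed: Instead of rescanning the melody from the cursor for every instrument note (A's inner k-loop, which even keeps scanning after its match), B builds a dict from each note to its melody positions once and walks each note's position list with a persistent per-note pointer, so each instrument row costs O(n+m) instead of O(n*m).
import Mathlib
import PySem

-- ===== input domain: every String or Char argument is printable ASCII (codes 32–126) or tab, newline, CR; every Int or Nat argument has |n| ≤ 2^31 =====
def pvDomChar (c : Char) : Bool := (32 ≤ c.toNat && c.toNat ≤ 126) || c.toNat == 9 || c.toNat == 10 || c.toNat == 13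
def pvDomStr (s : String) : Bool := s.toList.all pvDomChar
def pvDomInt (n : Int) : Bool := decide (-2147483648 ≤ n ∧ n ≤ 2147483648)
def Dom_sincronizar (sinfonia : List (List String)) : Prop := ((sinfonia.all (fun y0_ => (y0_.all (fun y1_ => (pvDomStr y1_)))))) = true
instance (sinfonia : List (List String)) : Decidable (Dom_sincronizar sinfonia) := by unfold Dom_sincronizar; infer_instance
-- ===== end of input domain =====

-- B replaces A's per-note rescan of the melody with a positions dict walked by
-- persistent per-note pointers (objective: faster; A raises IndexError on [], excluded by Pre_).


-- ===== PORT A =====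
-- All Python ints here (loop indices, `inicio`) are nonnegative array indices bounded by
-- list lengths, so they are ported as Nat (exact: Python's range/indexing over these values
-- never goes negative).
-- per-note inner loops of A: `cambiar = True; for k in range(inicio, len(silencio)): ...`
def pvPasoA (melodia : List String) (st : List String × Nat) (nota : String) : List String × Nat :=
  let r := (List.range' st.2 (st.1.length - st.2)).foldl
    (fun (s : Bool × List String × Nat) k =>
      if melodia.getD k "" == nota && s.1 then (false, s.2.1.set k nota, k + 1) else s)
    (true, st.1, st.2)
  (r.2.1, r.2.2)

def sincronizar (sinfonia : List (List String)) : List (List String) :=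
  let melodia := sinfonia.headD []   -- sinfonia[0]; Pre_ excludes the empty list
  (List.range' 1 (sinfonia.length - 1)).foldl
    (fun acc i =>
      let inst := sinfonia.getD i []
      let silencio := melodia.map (fun _ => "--")
      let r := inst.foldl (pvPasoA melodia) (silencio, 0)
      acc ++ [r.1])
    [melodia]

-- ===== PORT B =====
-- posiciones: note -> list of its melody indices (setdefault/append = modify with append)
def pvPosiciones (melodia : List String) : PySem.Dict String (List Nat) :=
  (List.range melodia.length).foldl
    (fun d k => d.modify (melodia.getD k "") [] (· ++ [k])) PySem.Dict.empty

-- the `while p < len(ps) and ps[p] < inicio: p += 1` loop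
def pvAvanzar (ps : List Nat) (inicio : Nat) (p : Nat) : Nat :=
  if p < ps.length then
    if ps.getD p 0 < inicio then pvAvanzar ps inicio (p + 1) else p
  else p
termination_by ps.length - p

-- one instrument note of B: advance this note's pointer, place the note if a position remains
def pvPasoB (pos : PySem.Dict String (List Nat))
    (st : PySem.Dict String Nat × List String × Nat) (nota : String) :
    PySem.Dict String Nat × List String × Nat :=
  let (punteros, fila, inicio) := st
  let ps := pos.getD nota []
  let p := pvAvanzar ps inicio (punteros.getD nota 0)
  if p < ps.length then
    (punteros.insert nota (p + 1), fila.set (ps.getD p 0) nota, ps.getD p 0 + 1)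
  else
    (punteros.insert nota p, fila, inicio)

def sincronizar_alt (sinfonia : List (List String)) : List (List String) :=
  let melodia := sinfonia.headD []
  let pos := pvPosiciones melodia
  (List.range' 1 (sinfonia.length - 1)).foldl
    (fun acc i =>
      let inst := sinfonia.getD i []
      let r := inst.foldl (pvPasoB pos)
        ((PySem.Dict.empty : PySem.Dict String Nat), List.replicate melodia.length "--", 0)
      acc ++ [r.2.1])
    [melodia]

-- ===== PRECONDITION & SPEC =====
-- A evaluates sinfonia[0] unconditionally, raising IndexError on the empty list; Pre_ excludes exactly that.
def Pre_sincronizar (sinfonia : List (List String)) : Prop := sinfonia ≠ []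
instance (sinfonia : List (List String)) : Decidable (Pre_sincronizar sinfonia) := by unfold Pre_sincronizar; infer_instance
def pvWitness_sincronizar : List (List String) := [["a", "b"], ["b", "a"]]

def Spec_sincronizar (sinfonia : List (List String)) (out : List (List String)) : Prop := out = sincronizar_alt sinfonia
instance (sinfonia : List (List String)) (out : List (List String)) : Decidable (Spec_sincronizar sinfonia out) := by unfold Spec_sincronizar; infer_instance

-- ===== CLAIM (what is proved, stated in full; the proofs are below) =====
def Claim_equal_sincronizar : Prop := ∀ (sinfonia : List (List String)), Dom_sincronizar sinfonia → Pre_sincronizar sinfonia → Spec_sincronizar sinfonia (sincronizar sinfonia)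



-- ===== LEMMAS AND PROOFS =====

-- the melody positions of a note, in increasing index order (the value pvPosiciones stores)
def pvPosn (m : List String) (n : String) : List Nat :=
  (List.range m.length).filter (fun k => m.getD k "" == n)

lemma pvPos_getD (m : List String) (n : String) :
    (pvPosiciones m).getD n [] = pvPosn m n := by
  unfold pvPosiciones pvPosn
  have hfold : (List.range m.length).foldl
      (fun d k => d.modify (m.getD k "") [] (· ++ [k])) PySem.Dict.empty
      = ((List.range m.length).map (fun k => (m.getD k "", k))).foldl
          (fun (d : PySem.Dict String (List Nat)) p => d.modify p.1 [] (· ++ [p.2]))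
          PySem.Dict.empty := by
    rw [List.foldl_map]
  rw [hfold, PySem.Dict.getD_foldl_modify_append, PySem.Dict.getD_empty,
    List.filter_map, List.map_map]
  simp [Function.comp_def]

-- once `cambiar` is false, A's inner loop is the identity
lemma pvFoldA_dead (c : Nat → Bool) (n : String) :
    ∀ (l : List Nat) (s : List String) (a : Nat),
      l.foldl (fun (st : Bool × List String × Nat) k =>
          if c k && st.1 then (false, st.2.1.set k n, k + 1) else st)
        (false, s, a) = (false, s, a) := by
  intro l
  induction l with
  | nil => intro s a; rfl
  | cons k t ih =>
      intro s a
      rw [List.foldl_cons, if_neg (by simp)]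
      exact ih s a

-- A's inner loop acts on the FIRST matching index of the scanned range
lemma pvFoldA_char (c : Nat → Bool) (n : String) :
    ∀ (l : List Nat) (s : List String) (a : Nat),
      l.foldl (fun (st : Bool × List String × Nat) k =>
          if c k && st.1 then (false, st.2.1.set k n, k + 1) else st)
        (true, s, a)
      = match l.find? c with
        | some k => (false, s.set k n, k + 1)
        | none => (true, s, a) := by
  intro l
  induction l with
  | nil => intro s a; rfl
  | cons k t ih =>
      intro s a
      rw [List.foldl_cons, List.find?_cons]
      cases h : c k with
      | true =>
          rw [if_pos (by simp)]
          exact pvFoldA_dead c n t (s.set k n) (k + 1)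
      | false =>
          rw [if_neg (by simp)]
          exact ih s a

-- a find? whose predicate holds everywhere returns the head
lemma pvFind_all (l : List Nat) (p : Nat → Bool) (h : ∀ x ∈ l, p x = true) :
    l.find? p = l.head? := by
  cases l with
  | nil => rfl
  | cons x t => simp [h x (by simp)]

-- scanning [a, L) for the first index with P = first melody position ≥ a
lemma pvFind_range' (L a : Nat) (h : a ≤ L) (p : Nat → Bool) :
    (List.range' a (L - a)).find? p
      = ((List.range L).filter p).find? (fun k => decide (a ≤ k)) := by
  have hsplit : List.range L = List.range' 0 a ++ List.range' a (L - a) := by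
    rw [List.range_eq_range']
    have h2 : List.range' 0 a ++ List.range' (0 + a) (L - a) = List.range' 0 (a + (L - a)) :=
      List.range'_append_1
    rw [Nat.zero_add] at h2
    conv_lhs => rw [show L = a + (L - a) from by omega]
    exact h2.symm
  rw [hsplit, List.filter_append, List.find?_append]
  have h1 : ((List.range' 0 a).filter p).find? (fun k => decide (a ≤ k)) = none := by
    apply List.find?_eq_none.mpr
    intro x hx
    have hxa := (List.mem_range'_1.mp (List.mem_of_mem_filter hx)).2
    simp only [Nat.zero_add] at hxa
    simp; omega
  have hR : ((List.range' a (L - a)).filter p).find? (fun k => decide (a ≤ k))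
      = ((List.range' a (L - a)).filter p).head? :=
    pvFind_all _ _ (fun x hx => by
      have hxa := (List.mem_range'_1.mp (List.mem_of_mem_filter hx)).1
      simp; omega)
  rw [h1, Option.none_or, hR]
  exact List.head?_filter.symm

-- what pvAvanzar guarantees: it stays in bounds, everything before it is < inicio,
-- and if it stops inside the list the element there is ≥ inicio
lemma pvAvanzar_spec (ps : List Nat) (a : Nat) :
    ∀ p, p ≤ ps.length →
      (∀ j, j < p → ∀ _ : j < ps.length, ps[j] < a) →
      (p ≤ pvAvanzar ps a p ∧ pvAvanzar ps a p ≤ ps.length ∧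
       (∀ j, j < pvAvanzar ps a p → ∀ _ : j < ps.length, ps[j] < a) ∧
       (∀ _ : pvAvanzar ps a p < ps.length, a ≤ ps[pvAvanzar ps a p])) := by
  intro p
  induction hfuel : ps.length - p using Nat.strong_induction_on generalizing p with
  | _ fuel ih =>
    intro hp hpre
    by_cases h1 : p < ps.length
    · by_cases h2 : ps.getD p 0 < a
      · have heq : pvAvanzar ps a p = pvAvanzar ps a (p + 1) := by
          conv_lhs => rw [pvAvanzar]
          rw [if_pos h1, if_pos h2]
        have hget : ps.getD p 0 = ps[p] := List.getD_eq_getElem ps 0 h1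
        have hrec := ih (ps.length - (p + 1)) (by omega) (p + 1) rfl (by omega)
          (fun j hj hjl => by
            rcases Nat.lt_or_ge j p with hc | hc
            · exact hpre j hc hjl
            · have hjp : j = p := by omega
              subst hjp; rw [← hget]; exact h2)
        simp only [heq]
        exact ⟨by omega, hrec.2.1, hrec.2.2.1, hrec.2.2.2⟩
      · have heq : pvAvanzar ps a p = p := by
          conv_lhs => rw [pvAvanzar]
          rw [if_pos h1, if_neg h2]
        simp only [heq]
        refine ⟨le_refl _, hp, hpre, fun _ => ?_⟩
        rw [← List.getD_eq_getElem ps 0 h1]; omega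
    · have heq : pvAvanzar ps a p = p := by
        conv_lhs => rw [pvAvanzar]
        rw [if_neg h1]
      simp only [heq]
      exact ⟨le_refl _, hp, hpre, fun h => absurd h h1⟩

-- first element ≥ a of a list whose first q elements are all < a
lemma pvFind_of_prefix (ps : List Nat) (a : Nat) :
    ∀ q, q ≤ ps.length →
      (∀ j, j < q → ∀ _ : j < ps.length, ps[j] < a) →
      (∀ _ : q < ps.length, a ≤ ps[q]) →
      ps.find? (fun x => decide (a ≤ x))
        = if h : q < ps.length then some ps[q] else none := by
  induction ps with
  | nil => intro q _ _ _; simp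
  | cons x t ih =>
      intro q hq hpre hstop
      cases q with
      | zero =>
          have hx : a ≤ x := hstop (by simp)
          simp [hx]
      | succ q' =>
          have hx : x < a := hpre 0 (by omega) (by simp)
          have hxf : (decide (a ≤ x)) = false := by simp; omega
          rw [List.find?_cons]
          simp only [hxf]
          have hrec := ih q' (by simpa using hq)
            (fun j hj hjl => by
              have hh := hpre (j + 1) (by omega) (by simpa using hjl)
              simpa using hh)
            (fun h => by
              have hh := hstop (by simpa using h)
              simpa using hh)
          rw [hrec]
          by_cases h : q' < t.length
          · rw [dif_pos h, dif_pos (show q' + 1 < (x :: t).length by simpa using h)]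
            simp
          · rw [dif_neg h, dif_neg (show ¬ q' + 1 < (x :: t).length by simp; omega)]

-- A's per-note step, characterised by the first melody position ≥ the cursor
lemma pvPasoA_char (m : List String) (n : String) (f : List String) (a : Nat)
    (hf : f.length = m.length) (ha : a ≤ m.length) :
    pvPasoA m (f, a) n
      = match (pvPosn m n).find? (fun x => decide (a ≤ x)) with
        | some k => (f.set k n, k + 1)
        | none => (f, a) := by
  unfold pvPasoA
  simp only [hf]
  rw [pvFoldA_char (fun k => m.getD k "" == n) n (List.range' a (m.length - a)) f a,
      pvFind_range' m.length a ha, ← pvPosn]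
  cases (pvPosn m n).find? (fun x => decide (a ≤ x)) <;> rfl

-- membership in pvPosn bounds the position by the melody length
lemma pvPosn_lt (m : List String) (n : String) (k : Nat) (h : k ∈ pvPosn m n) :
    k < m.length := by
  unfold pvPosn at h
  exact List.mem_range.mp (List.mem_of_mem_filter h)

-- loop invariant of B's pointer dict: every pointer is in bounds and everything
-- strictly before it is a position < the current cursor
def pvInv (pos : PySem.Dict String (List Nat)) (pt : PySem.Dict String Nat) (a : Nat) : Prop :=
  ∀ n : String, pt.getD n 0 ≤ (pos.getD n []).length ∧
    ∀ j, j < pt.getD n 0 → ∀ _ : j < (pos.getD n []).length, (pos.getD n [])[j] < a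

-- one note: B's step equals A's step and preserves the invariant
lemma pvStep_eq (m : List String) (pt : PySem.Dict String Nat) (f : List String)
    (a : Nat) (n : String) (hf : f.length = m.length) (ha : a ≤ m.length)
    (hInv : pvInv (pvPosiciones m) pt a) :
    (pvPasoB (pvPosiciones m) (pt, f, a) n).2.1 = (pvPasoA m (f, a) n).1 ∧
    (pvPasoB (pvPosiciones m) (pt, f, a) n).2.2 = (pvPasoA m (f, a) n).2 ∧
    (pvPasoA m (f, a) n).1.length = m.length ∧
    (pvPasoA m (f, a) n).2 ≤ m.length ∧
    pvInv (pvPosiciones m) (pvPasoB (pvPosiciones m) (pt, f, a) n).1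
      (pvPasoB (pvPosiciones m) (pt, f, a) n).2.2 := by
  have hps := pvPos_getD m n
  obtain ⟨hb, hpre⟩ := hInv n
  rw [hps] at hb hpre
  set ps := pvPosn m n with hpsdef
  set q := pvAvanzar ps a (pt.getD n 0) with hq
  obtain ⟨hq1, hq2, hq3, hq4⟩ := pvAvanzar_spec ps a (pt.getD n 0) hb hpre
  have hfind := pvFind_of_prefix ps a q hq2 hq3 hq4
  by_cases h : q < ps.length
  · have hfind' : ps.find? (fun x => decide (a ≤ x)) = some ps[q] := by
      rw [hfind, dif_pos h]
    have hB : pvPasoB (pvPosiciones m) (pt, f, a) n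
        = (pt.insert n (q + 1), f.set ps[q] n, ps[q] + 1) := by
      unfold pvPasoB
      simp only [hps, ← hq]
      rw [if_pos h, List.getD_eq_getElem ps 0 h]
    have hkL : ps[q] < m.length := pvPosn_lt m n _ (List.getElem_mem h)
    have hak : a ≤ ps[q] := hq4 h
    rw [pvPasoA_char m n f a hf ha, hfind', hB]
    dsimp only
    refine ⟨rfl, rfl, by simp [hf], by omega, ?_⟩
    intro n'
    by_cases hn : n' = n
    · subst hn
      rw [PySem.Dict.getD_insert, if_pos rfl, hps]
      refine ⟨by omega, fun j hj hjl => ?_⟩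
      rcases Nat.lt_or_ge j q with hc | hc
      · have := hq3 j hc hjl; omega
      · have hjq : j = q := by omega
        subst hjq; omega
    · rw [PySem.Dict.getD_insert, if_neg hn]
      obtain ⟨hb', hpre'⟩ := hInv n'
      refine ⟨hb', fun j hj hjl => ?_⟩
      have := hpre' j hj hjl; omega
  · have hfind' : ps.find? (fun x => decide (a ≤ x)) = none := by
      rw [hfind, dif_neg h]
    have hB : pvPasoB (pvPosiciones m) (pt, f, a) n = (pt.insert n q, f, a) := by
      unfold pvPasoB
      simp only [hps, ← hq]
      rw [if_neg h]
    rw [pvPasoA_char m n f a hf ha, hfind', hB]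
    dsimp only
    refine ⟨rfl, rfl, hf, ha, ?_⟩
    intro n'
    by_cases hn : n' = n
    · subst hn
      rw [PySem.Dict.getD_insert, if_pos rfl, hps]
      exact ⟨hq2, hq3⟩
    · rw [PySem.Dict.getD_insert, if_neg hn]
      exact hInv n'

-- the whole per-instrument fold: B's row and cursor track A's
lemma pvFila_eq (m : List String) :
    ∀ (inst : List String) (f : List String) (a : Nat) (pt : PySem.Dict String Nat),
      f.length = m.length → a ≤ m.length → pvInv (pvPosiciones m) pt a →
      ((inst.foldl (pvPasoB (pvPosiciones m)) (pt, f, a)).2.1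
          = (inst.foldl (pvPasoA m) (f, a)).1 ∧
       (inst.foldl (pvPasoB (pvPosiciones m)) (pt, f, a)).2.2
          = (inst.foldl (pvPasoA m) (f, a)).2) := by
  intro inst
  induction inst with
  | nil => intro f a pt hf ha hInv; exact ⟨rfl, rfl⟩
  | cons n t ih =>
      intro f a pt hf ha hInv
      obtain ⟨h1, h2, h3, h4, h5⟩ := pvStep_eq m pt f a n hf ha hInv
      simp only [List.foldl_cons]
      have hB : pvPasoB (pvPosiciones m) (pt, f, a) n
          = ((pvPasoB (pvPosiciones m) (pt, f, a) n).1,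
             (pvPasoA m (f, a) n).1, (pvPasoA m (f, a) n).2) := by
        rw [← h1, ← h2]
      have hA : pvPasoA m (f, a) n = ((pvPasoA m (f, a) n).1, (pvPasoA m (f, a) n).2) := rfl
      rw [hB, hA]
      exact ih _ _ _ h3 h4 (by rw [← h2]; exact h5)

-- the empty pointer dict satisfies the invariant
lemma pvInv_empty (m : List String) (a : Nat) :
    pvInv (pvPosiciones m) PySem.Dict.empty a := by
  intro n
  rw [PySem.Dict.getD_empty]
  exact ⟨Nat.zero_le _, fun j hj => by omega⟩

-- ===== VERDICT (by name: the statement is the Claim_ definition above) =====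
theorem sincronizar_spec : Claim_equal_sincronizar := by
  intro sinfonia _ _
  unfold Spec_sincronizar sincronizar sincronizar_alt
  apply List.foldl_ext
  intro acc i _
  dsimp only
  set m := sinfonia.headD [] with hm
  have hrow := (pvFila_eq m (sinfonia.getD i []) (m.map (fun _ => "--")) 0
    PySem.Dict.empty (by simp) (Nat.zero_le _) (pvInv_empty m 0)).1
  rw [List.map_const'] at hrow
  rw [List.map_const', hrow]
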